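-- pv_equiv track=rewrite | github.com/chhalsted/gems-tools-pro | Scripts/GeMS_GeolexCheck_AGP2.py | sanitize_matches
-- ===== SOURCE A (Python) =====
-- def sanitize_matches(list1, nametext):
--     """Remove names that occur in other, longer names, eg.,
--         Saddle in Saddle Mountains or Basin in Basin City, etc.
--         and returns a list; [position of Geolex name in fullname, Geolex name]
--         position is first item in list so that the list can be sorted"""
--
--     # remove duplicates
--     list1 = set(list1)
--
--     # make a dictionary with keys from the list
--     match_d = dict.fromkeys(list1, '')
--     list2 = list1
--     for item1 in list1:
--         for item2 in list2:
--             if (item2.startswith(item1 + ' ') or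
--                 item2.endswith(' ' + item1) or
--                 item2.find(' ' + item1 + ' ') != -1 and
--                 len(item2) > len(item1)):
--                 match_d[item1] = 'delete'
--
--     # and now sort by position in the name text
--     list3 = [item for item in list1 if not match_d[item] == 'delete']
--     list4 = []
--     for name in list3:
--         list4.append([nametext.find(name), name])
--
--     return sorted(list4)
-- ===== SOURCE B (Python) =====
-- def sanitize_matches(list1, nametext):
--     """Keep only names that are not a space-delimited sub-phrase of another
--     name; return sorted [nametext.find(name), name] pairs.
--     Instead of A's pairwise startswith/endswith/find scan, build once the set
--     of all proper space-delimited pieces (prefix before a space, suffix after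
--     a space, segment between two spaces) of every name, then keep the names
--     not in that set."""
--     names = set(list1)
--     pieces = set()
--     for m in names:
--         spaces = [p for p in range(len(m)) if m[p] == ' ']
--         for k in range(len(spaces)):
--             pieces.add(m[:spaces[k]])
--             pieces.add(m[spaces[k] + 1:])
--             for l in range(k + 1, len(spaces)):
--                 pieces.add(m[spaces[k] + 1:spaces[l]])
--     return sorted([nametext.find(name), name] for name in names if name not in pieces)
-- ===== Notes on version B (the rewrite author's own statement) =====
-- stated objective: faster
-- what changed: A scans all ordered pairs of names with startswith/endswith/find to mark shorter names for deletion; B instead makes one pass over the names building a set of every proper space-delimited piece (prefix before a space, suffix after a space, segment between two spaces) of each name, then keeps exactly the names not in that set, removing the quadratic pairwise scan.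
import Mathlib
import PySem

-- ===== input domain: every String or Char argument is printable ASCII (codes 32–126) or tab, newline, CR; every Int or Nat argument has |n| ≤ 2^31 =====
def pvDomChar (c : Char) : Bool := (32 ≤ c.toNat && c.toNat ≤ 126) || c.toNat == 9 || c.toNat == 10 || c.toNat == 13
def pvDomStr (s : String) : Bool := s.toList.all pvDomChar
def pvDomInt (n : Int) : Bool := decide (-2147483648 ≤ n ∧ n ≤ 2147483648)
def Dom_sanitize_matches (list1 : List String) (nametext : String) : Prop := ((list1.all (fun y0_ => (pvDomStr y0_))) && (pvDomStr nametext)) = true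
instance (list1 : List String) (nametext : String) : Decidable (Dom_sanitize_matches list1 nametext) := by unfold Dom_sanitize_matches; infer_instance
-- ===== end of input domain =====

-- B replaces A's quadratic pairwise startswith/endswith/find scan by one pass that
-- collects every proper space-delimited piece of every name into a set (objective: faster, measured).

-- ===== PORT A =====
-- the if-condition of A's inner loop (Python 'and' binds tighter than 'or')
def pvCondA (item1 item2 : String) : Bool :=
  PySem.Str.startswith item2 (item1 ++ " ") ||
  PySem.Str.endswith item2 (" " ++ item1) ||
  (PySem.Str.find item2 (" " ++ item1 ++ " ") != (-1 : Int) &&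
   decide (PySem.Str.len item1 < PySem.Str.len item2))

def sanitize_matches (list1 : List String) (nametext : String) : List (Int × String) :=
  -- list1 = set(list1)
  let l1 : PySem.Set String := PySem.Set.ofList list1
  -- match_d = dict.fromkeys(list1, '')
  let match_d : PySem.Dict String String := l1.foldl (fun d k => d.insert k "") PySem.Dict.empty
  -- nested for-loops setting match_d[item1] = 'delete'
  let match_d2 := l1.foldl (fun d item1 =>
      l1.foldl (fun d item2 => if pvCondA item1 item2 then d.insert item1 "delete" else d) d) match_d
  -- list3 = [item for item in list1 if not match_d[item] == 'delete']  (every item is a key)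
  let list3 := l1.filter (fun item => !(PySem.Dict.getD match_d2 item "" == "delete"))
  -- list4 = [] ; for name in list3: list4.append([nametext.find(name), name])
  let list4 := list3.foldl (fun acc name => acc ++ [((PySem.Str.find nametext name : Int), name)]) ([] : List (Int × String))
  -- sorted(list4)  (Python list comparison = lexicographic on (int, str))
  PySem.List.sorted2 list4 (fun p => p.1) (fun p => p.2)

-- ===== PORT B =====
-- body of B's 'for m in names' loop: add every proper space-delimited piece of m
-- spaces = [p for p in range(len(m)) if m[p] == ' ']
def pvSpaces (m : String) : List Int :=
  (PySem.List.pyRange 0 (PySem.Str.len m) 1).filter (fun p => PySem.Str.pyGet? m p == some ' ')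

def pvAddPieces (pieces : PySem.Set String) (m : String) : PySem.Set String :=
  let spaces : List Int := pvSpaces m
  (PySem.List.pyRange 0 (spaces.length : Int) 1).foldl (fun pieces k =>
    let p := PySem.List.pyGetD spaces k 0
    let pieces := PySem.Set.add pieces (PySem.Str.slice m none (some p))
    let pieces := PySem.Set.add pieces (PySem.Str.slice m (some (p + 1)) none)
    (PySem.List.pyRange (k + 1) (spaces.length : Int) 1).foldl (fun pieces l =>
      PySem.Set.add pieces (PySem.Str.slice m (some (p + 1)) (some (PySem.List.pyGetD spaces l 0)))) pieces)
    pieces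

def sanitize_matches_alt (list1 : List String) (nametext : String) : List (Int × String) :=
  let names : PySem.Set String := PySem.Set.ofList list1
  let pieces : PySem.Set String := names.foldl pvAddPieces PySem.Set.empty
  let kept := names.filter (fun name => !(PySem.Set.contains pieces name))
  PySem.List.sorted2 (kept.map (fun name => ((PySem.Str.find nametext name : Int), name)))
    (fun p => p.1) (fun p => p.2)

-- ===== PRECONDITION & SPEC =====
def Spec_sanitize_matches (list1 : List String) (nametext : String) (out : List (Int × String)) : Prop := out = sanitize_matches_alt list1 nametext
instance (list1 : List String) (nametext : String) (out : List (Int × String)) : Decidable (Spec_sanitize_matches list1 nametext out) := by unfold Spec_sanitize_matches; infer_instance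

-- ===== CLAIM (what is proved, stated in full; the proofs are below) =====
def Claim_equal_sanitize_matches : Prop := ∀ (list1 : List String) (nametext : String), Dom_sanitize_matches list1 nametext → Spec_sanitize_matches list1 nametext (sanitize_matches list1 nametext)

-- ===== LEMMAS AND PROOFS =====

-- u followed by a space is a prefix of t iff u is what precedes some space of t
lemma pv_prefix_space_iff (u t : List Char) :
    (u ++ [' ']) <+: t ↔ ∃ p : Nat, p < t.length ∧ t[p]? = some ' ' ∧ u = t.take p := by
  constructor
  · rintro ⟨r, hr⟩
    subst hr
    refine ⟨u.length, by simp, ?_, ?_⟩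
    · simp
    · rw [List.append_assoc, List.take_left]
  · rintro ⟨p, hp, hc, hu⟩
    refine ⟨t.drop (p+1), ?_⟩
    have hg : t[p] = ' ' := by
      have := List.getElem?_eq_getElem hp
      rw [hc] at this; exact (Option.some_inj.mp this.symm)
    conv_rhs => rw [← List.take_append_drop p t]
    rw [List.drop_eq_getElem_cons hp]
    subst hu; simp [hg]

-- a space followed by u is a suffix of t iff u is what follows some space of t
lemma pv_suffix_space_iff (u t : List Char) :
    ([' '] ++ u) <:+ t ↔ ∃ p : Nat, p < t.length ∧ t[p]? = some ' ' ∧ u = t.drop (p+1) := by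
  constructor
  · rintro ⟨r, hr⟩
    subst hr
    refine ⟨r.length, by simp, ?_, ?_⟩
    · simp
    · simp [List.drop_append]
  · rintro ⟨p, hp, hc, hu⟩
    refine ⟨t.take p, ?_⟩
    have hg : t[p] = ' ' := by
      have := List.getElem?_eq_getElem hp
      rw [hc] at this; exact (Option.some_inj.mp this.symm)
    conv_rhs => rw [← List.take_append_drop p t]
    rw [List.drop_eq_getElem_cons hp]
    subst hu; simp [hg]

-- u between two spaces is an infix of t iff u lies between two space positions of t
lemma pv_infix_space_iff (u t : List Char) :
    ([' '] ++ u ++ [' ']) <:+: t ↔ ∃ p q : Nat, p < q ∧ q < t.length ∧ t[p]? = some ' ' ∧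
      t[q]? = some ' ' ∧ u = (t.drop (p+1)).take (q - (p+1)) := by
  constructor
  · rintro ⟨a, b, hab⟩
    subst hab
    refine ⟨a.length, a.length + 1 + u.length, by omega, by simp; omega, ?_, ?_, ?_⟩
    · simp
    · have h0 : a.length + 1 + u.length = (a ++ ([' '] ++ u)).length := by simp; omega
      rw [h0]
      rw [show a ++ ([' '] ++ u ++ [' ']) ++ b = (a ++ ([' '] ++ u)) ++ ([' '] ++ b) by simp]
      simp
    · have h1 : (a ++ ([' '] ++ u ++ [' ']) ++ b).drop (a.length + 1) = u ++ [' '] ++ b := by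
        rw [show a ++ ([' '] ++ u ++ [' ']) ++ b = (a ++ [' ']) ++ (u ++ [' '] ++ b) by simp]
        rw [show a.length + 1 = (a ++ [' ']).length by simp]
        exact List.drop_left ..
      rw [h1]
      rw [show a.length + 1 + u.length - (a.length + 1) = u.length by omega]
      rw [List.append_assoc, List.take_left]
  · rintro ⟨p, q, hpq, hq, hcp, hcq, hu⟩
    have hp : p < t.length := by omega
    have hgp : t[p] = ' ' := by
      have := List.getElem?_eq_getElem hp
      rw [hcp] at this; exact (Option.some_inj.mp this.symm)
    have hgq : t[q] = ' ' := by
      have := List.getElem?_eq_getElem hq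
      rw [hcq] at this; exact (Option.some_inj.mp this.symm)
    subst hu
    refine ⟨t.take p, t.drop (q+1), ?_⟩
    have h2 : (t.drop (p+1)).drop (q - (p+1)) = t.drop q := by
      rw [List.drop_drop]; congr 1; omega
    conv_rhs => rw [← List.take_append_drop p t, List.drop_eq_getElem_cons hp, hgp,
      ← List.take_append_drop (q-(p+1)) (List.drop (p+1) t), h2,
      List.drop_eq_getElem_cons hq, hgq]
    simp

-- u is a proper space-delimited piece of t
def pvPieceL (u t : List Char) : Prop :=
  (∃ p : Nat, p < t.length ∧ t[p]? = some ' ' ∧ (u = t.take p ∨ u = t.drop (p+1))) ∨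
  (∃ p q : Nat, p < q ∧ q < t.length ∧ t[p]? = some ' ' ∧ t[q]? = some ' ' ∧
    u = (t.drop (p+1)).take (q - (p+1)))

-- A's if-condition holds exactly when item1 is a proper space-delimited piece of item2
lemma pv_condA_iff (y m : String) : pvCondA y m = true ↔ pvPieceL y.toList m.toList := by
  have hlen : ([' '] ++ y.toList ++ [' ']) <:+: m.toList → y.toList.length < m.toList.length := by
    intro h
    have h2 := h.length_le
    simp only [List.length_append, List.length_cons, List.length_nil] at h2
    omega
  unfold pvCondA pvPieceL
  rw [Bool.or_eq_true, Bool.or_eq_true, Bool.and_eq_true]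
  rw [PySem.Str.startswith_eq, PySem.Str.endswith_eq]
  rw [PySem.Chars.startswith_iff, PySem.Chars.endswith_iff]
  rw [bne_iff_ne, ne_eq, ← not_not (a := PySem.Str.find _ _ = -1), ← ne_eq,
    PySem.Str.find_ne_neg_one_iff]
  simp only [String.toList_append, decide_eq_true_eq, PySem.Str.len_eq,
    show (" " : String).toList = [' '] from rfl, Nat.cast_lt]
  rw [pv_prefix_space_iff, pv_suffix_space_iff, pv_infix_space_iff, not_not]
  constructor
  · rintro ((⟨p, hp, hc, hu⟩ | ⟨p, hp, hc, hu⟩) | ⟨⟨p, q, hpq, hq, hcp, hcq, hu⟩, _⟩)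
    · exact Or.inl ⟨p, hp, hc, Or.inl hu⟩
    · exact Or.inl ⟨p, hp, hc, Or.inr hu⟩
    · exact Or.inr ⟨p, q, hpq, hq, hcp, hcq, hu⟩
  · rintro (⟨p, hp, hc, (hu | hu)⟩ | ⟨p, q, hpq, hq, hcp, hcq, hu⟩)
    · exact Or.inl (Or.inl ⟨p, hp, hc, hu⟩)
    · exact Or.inl (Or.inr ⟨p, hp, hc, hu⟩)
    · refine Or.inr ⟨⟨p, q, hpq, hq, hcp, hcq, hu⟩, ?_⟩
      exact hlen ((pv_infix_space_iff _ _).mpr ⟨p, q, hpq, hq, hcp, hcq, hu⟩)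

-- membership through a fold of set-insertions
lemma pv_foldl_mem {β : Type} (step : PySem.Set String → β → PySem.Set String)
    (Q : β → Prop) (y : String) (h : ∀ s k, y ∈ step s k ↔ y ∈ s ∨ Q k) :
    ∀ (L : List β) (s0 : PySem.Set String), y ∈ L.foldl step s0 ↔ y ∈ s0 ∨ ∃ k ∈ L, Q k := by
  intro L
  induction L with
  | nil => intro s0; simp
  | cons hd tl ih =>
    intro s0
    rw [List.foldl_cons, ih, h]
    simp only [List.mem_cons]
    constructor
    · rintro ((hy | hq) | ⟨k, hk, hqk⟩)
      · exact Or.inl hy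
      · exact Or.inr ⟨hd, Or.inl rfl, hq⟩
      · exact Or.inr ⟨k, Or.inr hk, hqk⟩
    · rintro (hy | ⟨k, (rfl | hk), hqk⟩)
      · exact Or.inl (Or.inl hy)
      · exact Or.inl (Or.inr hqk)
      · exact Or.inr ⟨k, hk, hqk⟩

lemma pv_mem_spaces (m : String) (x : Int) :
    x ∈ pvSpaces m ↔ 0 ≤ x ∧ x.toNat < m.toList.length ∧ m.toList[x.toNat]? = some ' ' := by
  unfold pvSpaces
  rw [List.mem_filter, PySem.List.mem_pyRange_one, PySem.Str.len_eq]
  constructor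
  · rintro ⟨⟨h0, h1⟩, h2⟩
    refine ⟨h0, by omega, ?_⟩
    obtain ⟨n, rfl⟩ := Int.eq_ofNat_of_zero_le h0
    simpa using beq_iff_eq.mp h2
  · rintro ⟨h0, h1, h2⟩
    obtain ⟨n, rfl⟩ := Int.eq_ofNat_of_zero_le h0
    refine ⟨⟨by omega, by simpa using h1⟩, ?_⟩
    rw [beq_iff_eq]
    simpa using h2

lemma pv_spaces_sorted (m : String) : (pvSpaces m).Pairwise (· < ·) :=
  List.Pairwise.filter _ (PySem.List.pairwise_lt_pyRange_one ..)

-- the indexed existence over the spaces list says exactly 'y is a proper piece of m'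
lemma pv_exists_idx_iff (m y : String) :
    (∃ k ∈ PySem.List.pyRange 0 (((pvSpaces m).length : Nat) : Int) 1,
      y = PySem.Str.slice m none (some (PySem.List.pyGetD (pvSpaces m) k 0)) ∨
      y = PySem.Str.slice m (some (PySem.List.pyGetD (pvSpaces m) k 0 + 1)) none ∨
      ∃ l ∈ PySem.List.pyRange (k + 1) (((pvSpaces m).length : Nat) : Int) 1,
        y = PySem.Str.slice m (some (PySem.List.pyGetD (pvSpaces m) k 0 + 1))
              (some (PySem.List.pyGetD (pvSpaces m) l 0)))
      ↔ pvPieceL y.toList m.toList := by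
  have hsort := pv_spaces_sorted m
  have hget : ∀ (kn : Nat) (h : kn < (pvSpaces m).length),
      PySem.List.pyGetD (pvSpaces m) (kn : Int) 0 = (pvSpaces m)[kn] := by
    intro kn h
    rw [PySem.List.pyGetD_of_nonneg _ _ (by omega)]
    simp [List.getD_eq_getElem?_getD, List.getElem?_eq_getElem h]
  have htake : ∀ (p : Int), 0 ≤ p →
      (PySem.Str.slice m none (some p)).toList = m.toList.take p.toNat := by
    intro p h0
    rw [PySem.Str.toList_slice, PySem.Chars.slice_eq_listSlice, PySem.List.slice_to _ h0]
  have hdrop : ∀ (p : Int), 0 ≤ p →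
      (PySem.Str.slice m (some (p + 1)) none).toList = m.toList.drop (p.toNat + 1) := by
    intro p h0
    rw [PySem.Str.toList_slice, PySem.Chars.slice_eq_listSlice, PySem.List.slice_from _ (by omega)]
    congr 1
    omega
  have hmid : ∀ (p q : Int), 0 ≤ p → p < q →
      (PySem.Str.slice m (some (p + 1)) (some q)).toList
        = (m.toList.drop (p.toNat + 1)).take (q.toNat - (p.toNat + 1)) := by
    intro p q h0 h1
    rw [PySem.Str.toList_slice, PySem.Chars.slice_eq_listSlice,
      PySem.List.slice_toNat _ (by omega) (by omega),
      show (p + 1 : Int).toNat = p.toNat + 1 from by omega]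
  constructor
  · rintro ⟨k, hk, hcase⟩
    rw [PySem.List.mem_pyRange_one] at hk
    obtain ⟨kn, rfl⟩ := Int.eq_ofNat_of_zero_le hk.1
    have hkn : kn < (pvSpaces m).length := by exact_mod_cast hk.2
    have hpS : (pvSpaces m)[kn] ∈ pvSpaces m := List.getElem_mem hkn
    obtain ⟨hp0, hplt, hpch⟩ := (pv_mem_spaces m _).mp hpS
    rcases hcase with hy | hy | ⟨l, hl, hy⟩
    · refine Or.inl ⟨((pvSpaces m)[kn]).toNat, hplt, hpch, Or.inl ?_⟩
      rw [hy, hget kn hkn, htake _ hp0]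
    · refine Or.inl ⟨((pvSpaces m)[kn]).toNat, hplt, hpch, Or.inr ?_⟩
      rw [hy, hget kn hkn, hdrop _ hp0]
    · rw [PySem.List.mem_pyRange_one] at hl
      obtain ⟨ln, rfl⟩ := Int.eq_ofNat_of_zero_le (le_trans (by omega : (0:Int) ≤ (kn:Int) + 1) hl.1)
      have hln : ln < (pvSpaces m).length := by exact_mod_cast hl.2
      have hkl : kn < ln := by have := hl.1; omega
      have hqS : (pvSpaces m)[ln] ∈ pvSpaces m := List.getElem_mem hln
      obtain ⟨hq0, hqlt, hqch⟩ := (pv_mem_spaces m _).mp hqS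
      have hpq : (pvSpaces m)[kn] < (pvSpaces m)[ln] :=
        List.pairwise_iff_getElem.mp hsort kn ln hkn hln hkl
      refine Or.inr ⟨((pvSpaces m)[kn]).toNat, ((pvSpaces m)[ln]).toNat,
        by omega, hqlt, hpch, hqch, ?_⟩
      rw [hy, hget kn hkn, hget ln hln, hmid _ _ hp0 hpq]
  · intro hpiece
    have hidx : ∀ pn : Nat, pn < m.toList.length → m.toList[pn]? = some ' ' →
        ∃ kn : Nat, ∃ h : kn < (pvSpaces m).length, (pvSpaces m)[kn] = (pn : Int) := by
      intro pn h1 h2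
      have : (pn : Int) ∈ pvSpaces m := (pv_mem_spaces m _).mpr ⟨by omega, by simpa using h1, by simpa using h2⟩
      exact List.mem_iff_getElem.mp this
    rcases hpiece with ⟨pn, hplt, hpch, hu⟩ | ⟨pn, qn, hpq, hqlt, hpch, hqch, hu⟩
    · obtain ⟨kn, hkn, hSk⟩ := hidx pn hplt hpch
      have hg2 : PySem.List.pyGetD (pvSpaces m) (kn : Int) 0 = (pn : Int) := by
        rw [hget kn hkn]; exact hSk
      refine ⟨(kn : Int), by rw [PySem.List.mem_pyRange_one]; constructor <;> omega, ?_⟩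
      rw [hg2]
      rcases hu with hu | hu
      · exact Or.inl (String.toList_inj.mp (by rw [htake _ (by omega)]; simpa using hu))
      · exact Or.inr (Or.inl (String.toList_inj.mp (by rw [hdrop _ (by omega)]; simpa using hu)))
    · obtain ⟨kn, hkn, hSk⟩ := hidx pn (by omega) hpch
      obtain ⟨ln, hln, hSl⟩ := hidx qn hqlt hqch
      have hg2 : PySem.List.pyGetD (pvSpaces m) (kn : Int) 0 = (pn : Int) := by
        rw [hget kn hkn]; exact hSk
      have hg3 : PySem.List.pyGetD (pvSpaces m) (ln : Int) 0 = (qn : Int) := by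
        rw [hget ln hln]; exact hSl
      have hkl : kn < ln := by
        rcases Nat.lt_trichotomy kn ln with h | h | h
        · exact h
        · exfalso
          subst h
          rw [hSk] at hSl
          omega
        · exfalso
          have := List.pairwise_iff_getElem.mp hsort ln kn hln hkn h
          rw [hSk, hSl] at this
          omega
      refine ⟨(kn : Int), by rw [PySem.List.mem_pyRange_one]; constructor <;> omega,
        Or.inr (Or.inr ⟨(ln : Int), by rw [PySem.List.mem_pyRange_one]; constructor <;> omega, ?_⟩)⟩
      rw [hg2, hg3]
      refine String.toList_inj.mp ?_
      rw [hmid _ _ (by omega) (by exact_mod_cast hpq)]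
      simpa using hu

-- membership after processing one name
lemma pv_addPieces_mem (s : PySem.Set String) (m y : String) :
    y ∈ pvAddPieces s m ↔ y ∈ s ∨ pvPieceL y.toList m.toList := by
  rw [show pvAddPieces s m
      = (PySem.List.pyRange 0 (((pvSpaces m).length : Nat) : Int) 1).foldl (fun pieces k =>
          (PySem.List.pyRange (k + 1) (((pvSpaces m).length : Nat) : Int) 1).foldl (fun pieces l =>
            PySem.Set.add pieces (PySem.Str.slice m (some (PySem.List.pyGetD (pvSpaces m) k 0 + 1))
              (some (PySem.List.pyGetD (pvSpaces m) l 0))))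
            (PySem.Set.add (PySem.Set.add pieces (PySem.Str.slice m none (some (PySem.List.pyGetD (pvSpaces m) k 0))))
              (PySem.Str.slice m (some (PySem.List.pyGetD (pvSpaces m) k 0 + 1)) none))) s
    from rfl]
  rw [pv_foldl_mem _ (fun k =>
      y = PySem.Str.slice m none (some (PySem.List.pyGetD (pvSpaces m) k 0)) ∨
      y = PySem.Str.slice m (some (PySem.List.pyGetD (pvSpaces m) k 0 + 1)) none ∨
      ∃ l ∈ PySem.List.pyRange (k + 1) (((pvSpaces m).length : Nat) : Int) 1,
        y = PySem.Str.slice m (some (PySem.List.pyGetD (pvSpaces m) k 0 + 1))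
              (some (PySem.List.pyGetD (pvSpaces m) l 0))) y ?_]
  · rw [pv_exists_idx_iff]
  · intro s' k
    rw [pv_foldl_mem _ (fun l =>
        y = PySem.Str.slice m (some (PySem.List.pyGetD (pvSpaces m) k 0 + 1))
              (some (PySem.List.pyGetD (pvSpaces m) l 0))) y
      (fun s'' l => PySem.Set.mem_add ..)]
    rw [PySem.Set.mem_add, PySem.Set.mem_add]
    tauto

-- value of the fromkeys dict
lemma pv_fromkeys_getD (L : List String) (x : String) :
    PySem.Dict.getD (L.foldl (fun d k => d.insert k "") PySem.Dict.empty) x "" = "" := by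
  have h : ∀ (d : PySem.Dict String String), PySem.Dict.getD d x "" = "" →
      PySem.Dict.getD (L.foldl (fun d k => d.insert k "") d) x "" = "" := by
    induction L with
    | nil => intro d hd; simpa using hd
    | cons hd tl ih =>
      intro d hdd
      rw [List.foldl_cons]
      apply ih
      rw [PySem.Dict.getD_insert]
      split <;> simp [hdd]
  exact h _ (by rfl)

-- value at x after A's inner loop over item2 (key touched: only i1)
lemma pv_inner_getD (i1 : String) (L : List String) (d : PySem.Dict String String) (x : String) :
    PySem.Dict.getD (L.foldl (fun d item2 => if pvCondA i1 item2 then d.insert i1 "delete" else d) d) x ""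
      = if x = i1 ∧ L.any (pvCondA i1) then "delete" else PySem.Dict.getD d x "" := by
  induction L generalizing d with
  | nil => simp
  | cons hd tl ih =>
    rw [List.foldl_cons]
    by_cases hc : pvCondA i1 hd = true
    · rw [if_pos hc, ih, PySem.Dict.getD_insert]
      by_cases hx : x = i1 <;> simp [hx, hc]
    · rw [if_neg hc, ih]
      simp [List.any_cons, hc]

-- value at x after A's double loop
lemma pv_outer_getD (L Li : List String) (d : PySem.Dict String String) (x : String) :
    PySem.Dict.getD (L.foldl (fun d item1 =>
        Li.foldl (fun d item2 => if pvCondA item1 item2 then d.insert item1 "delete" else d) d) d) x ""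
      = if x ∈ L ∧ Li.any (pvCondA x) then "delete" else PySem.Dict.getD d x "" := by
  induction L generalizing d with
  | nil => simp
  | cons hd tl ih =>
    rw [List.foldl_cons, ih, pv_inner_getD]
    by_cases hx : x = hd
    · subst hx
      by_cases ha : Li.any (pvCondA x) = true <;> simp [ha]
    · simp only [List.mem_cons]
      by_cases hm : x ∈ tl <;> by_cases ha : Li.any (pvCondA x) = true <;>
        simp [hx, hm, ha]

-- the two filter predicates agree
lemma pv_filter_eq (l1 : List String) :
    (l1.filter (fun item => !(PySem.Dict.getD
        (l1.foldl (fun d item1 =>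
          l1.foldl (fun d item2 => if pvCondA item1 item2 then d.insert item1 "delete" else d) d)
          (l1.foldl (fun d k => d.insert k "") PySem.Dict.empty)) item "" == "delete")))
      = l1.filter (fun name => !(PySem.Set.contains (l1.foldl pvAddPieces PySem.Set.empty) name)) := by
  apply List.filter_congr
  intro x hx
  rw [pv_outer_getD, pv_fromkeys_getD]
  have hmem : x ∈ l1.foldl pvAddPieces PySem.Set.empty ↔ ∃ m ∈ l1, pvPieceL x.toList m.toList := by
    rw [pv_foldl_mem pvAddPieces (fun m => pvPieceL x.toList m.toList) x
      (fun s k => pv_addPieces_mem s k x) l1 PySem.Set.empty]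
    simp [PySem.Set.empty]
  have hany : l1.any (pvCondA x) = true ↔ ∃ m ∈ l1, pvPieceL x.toList m.toList := by
    rw [List.any_eq_true]
    exact exists_congr (fun m => and_congr_right (fun _ => pv_condA_iff x m))
  by_cases h : ∃ m ∈ l1, pvPieceL x.toList m.toList
  · rw [if_pos ⟨hx, hany.mpr h⟩]
    have hco : PySem.Set.contains (l1.foldl pvAddPieces PySem.Set.empty) x = true :=
      (PySem.Set.contains_iff ..).mpr (hmem.mpr h)
    rw [hco]; rfl
  · rw [if_neg (fun hh => h (hany.mp hh.2))]
    have hco : PySem.Set.contains (l1.foldl pvAddPieces PySem.Set.empty) x = false := by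
      rw [← Bool.not_eq_true] at *
      rw [Bool.not_eq_true, ← Bool.not_eq_true]
      rw [PySem.Set.contains_iff ..]
      rw [hmem]; exact h
    rw [hco]; rfl

-- ===== VERDICT (by name: the statement is the Claim_ definition above) =====
theorem sanitize_matches_spec : Claim_equal_sanitize_matches := by
  intro list1 nametext _
  unfold Spec_sanitize_matches
  simp only [sanitize_matches, sanitize_matches_alt]
  rw [PySem.List.foldl_append_singleton_eq_map]
  rw [List.nil_append, pv_filter_eq]
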